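-- pv_equiv track=rewrite | github.com/aandoro/repaso_colecciones_python | ordena_positivos.py | orderna_positivos
-- ===== SOURCE A (Python) =====
-- def orderna_positivos(list):
--     if list != []:
--         list_positive = [k for k in list if k > 0]
--         list_positive = sorted(list_positive)
--         for index, number in enumerate(list):
--             if number > 0:
--                 list[index] = list_positive.pop(0)
--         pass
--     return list
-- ===== SOURCE B (Python) =====
-- def orderna_positivos(list):
--     # selection by repeated minimum-extraction: no sorted(), no queue of presorted values
--     pool = [k for k in list if k > 0]
--     for i, k in enumerate(list):
--         if k > 0:
--             m = min(pool)
--             pool.remove(m)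
--             list[i] = m
--     return list
-- ===== Notes on version B (the rewrite author's own statement) =====
-- stated objective: alternative
-- what changed: Drops the built-in sort + pop(0) queue entirely: B keeps an unsorted pool of the positive values and, in a single fused pass, repeatedly extracts the minimum from the pool and writes it at the next positive slot (selection by repeated min-extraction).
import Mathlib
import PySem

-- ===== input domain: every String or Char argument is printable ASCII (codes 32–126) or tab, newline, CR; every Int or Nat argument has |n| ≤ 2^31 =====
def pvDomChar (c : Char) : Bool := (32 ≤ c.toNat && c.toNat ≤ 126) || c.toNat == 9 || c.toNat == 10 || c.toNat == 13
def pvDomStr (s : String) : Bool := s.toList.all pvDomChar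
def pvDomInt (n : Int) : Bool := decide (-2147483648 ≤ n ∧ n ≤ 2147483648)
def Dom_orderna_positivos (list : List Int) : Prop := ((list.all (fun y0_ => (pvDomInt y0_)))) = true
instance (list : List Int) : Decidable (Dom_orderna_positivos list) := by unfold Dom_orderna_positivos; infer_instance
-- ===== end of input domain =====

-- B replaces A's one-shot built-in sort + pop(0) queue by selection via repeated
-- minimum-extraction from an unsorted pool, fused into the write-back pass
-- (same return value; both mutate the argument list in place in Python).


-- ===== PORT A =====
-- A's loop: for index, number in enumerate(list): if number > 0: list[index] = list_positive.pop(0)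
-- state = (the mutated list, the remaining sorted-positives queue).  pop(0) can never hit an
-- empty queue in Python (the queue holds one value per positive); the [] branch leaves the
-- state unchanged and is unreachable.
def ordLoopA : List (Int × Int) → List Int × List Int → List Int × List Int
  | [], st => st
  | (i, n) :: rest, (cur, q) =>
    if n > 0 then
      match q with
      | v :: q' => ordLoopA rest (cur.set i.toNat v, q')
      | [] => ordLoopA rest (cur, [])
    else ordLoopA rest (cur, q)

def orderna_positivos (list : List Int) : List Int :=
  if list ≠ [] then
    let list_positive := PySem.List.sorted (list.filter (fun k => k > 0)) (fun x => x) false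
    (ordLoopA (PySem.List.enumerate list 0) (list, list_positive)).1
  else list

-- ===== PORT B =====
-- B's loop: for i, k in enumerate(list): if k > 0: m = min(pool); pool.remove(m); list[i] = m
-- min(pool)/pool.remove(m) can never see an empty pool in Python (one entry per positive);
-- the getD defaults are unreachable.
def ordLoopB : List (Int × Int) → List Int → List Int → List Int
  | [], cur, _pool => cur
  | (i, k) :: rest, cur, pool =>
    if k > 0 then
      let m := (PySem.List.min? pool (fun y => y)).getD 0
      ordLoopB rest (cur.set i.toNat m) ((PySem.List.remove? pool m).getD pool)
    else ordLoopB rest cur pool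

def orderna_positivos_alt (list : List Int) : List Int :=
  ordLoopB (PySem.List.enumerate list 0) list (list.filter (fun k => k > 0))

-- ===== PRECONDITION & SPEC =====
def Spec_orderna_positivos (list : List Int) (out : List Int) : Prop := out = orderna_positivos_alt list
instance (list : List Int) (out : List Int) : Decidable (Spec_orderna_positivos list out) := by unfold Spec_orderna_positivos; infer_instance

-- ===== CLAIM (what is proved, stated in full; the proofs are below) =====
def Claim_equal_orderna_positivos : Prop := ∀ (list : List Int), Dom_orderna_positivos list → Spec_orderna_positivos list (orderna_positivos list)

-- ===== LEMMAS AND PROOFS =====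

-- the functional core of A: replace each positive of xs by the next value of the queue q
def ordMerge : List Int → List Int → List Int
  | [], _ => []
  | x :: xs, q =>
    if x > 0 then
      match q with
      | v :: q' => v :: ordMerge xs q'
      | [] => x :: ordMerge xs []
    else x :: ordMerge xs q

-- the functional core of B: replace each positive of xs by the minimum of the pool, removed
def ordMerge2 : List Int → List Int → List Int
  | [], _ => []
  | x :: xs, pool =>
    if x > 0 then
      let m := (PySem.List.min? pool (fun y => y)).getD 0
      m :: ordMerge2 xs ((PySem.List.remove? pool m).getD pool)
    else x :: ordMerge2 xs pool

-- selection sort by repeated minimum-extraction, as a standalone function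
def selSort (p : List Int) : List Int :=
  match h : PySem.List.min? p (fun y => y) with
  | none => []
  | some m => m :: selSort (p.erase m)
termination_by p.length
decreasing_by
  have hm : m ∈ p := PySem.List.min?_mem h
  have : p.length ≠ 0 := by cases p <;> simp_all
  simpa [List.length_erase_of_mem hm] using Nat.pred_lt this

theorem set_len_append (p xs : List Int) (x v : Int) :
    (p ++ x :: xs).set p.length v = p ++ v :: xs := by
  induction p with
  | nil => rfl
  | cons a p ih => simpa [List.set] using ih

theorem ordLoopA_merge (xs : List Int) : ∀ (q p : List Int),
    (ordLoopA (PySem.List.enumerate xs (p.length : Int)) (p ++ xs, q)).1 = p ++ ordMerge xs q := by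
  induction xs with
  | nil => intro q p; simp [PySem.List.enumerate_nil, ordLoopA, ordMerge]
  | cons x xs ih =>
    intro q p
    rw [PySem.List.enumerate_cons]
    by_cases hx : x > 0
    · cases q with
      | nil =>
        simp only [ordLoopA, if_pos hx, ordMerge]
        have := ih [] (p ++ [x])
        simp only [List.length_append, List.length_cons, List.length_nil] at this
        simpa [hx, List.append_assoc, Int.add_comm] using this
      | cons v q' =>
        simp only [ordLoopA, if_pos hx, ordMerge]
        have hset : (p ++ x :: xs).set ((p.length : Int)).toNat v = p ++ v :: xs := by
          simpa using set_len_append p xs x v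
        rw [hset]
        have := ih q' (p ++ [v])
        simp only [List.length_append, List.length_cons, List.length_nil] at this
        simpa [hx, List.append_assoc, Int.add_comm] using this
    · simp only [ordLoopA, if_neg hx, ordMerge]
      have := ih q (p ++ [x])
      simp only [List.length_append, List.length_cons, List.length_nil] at this
      simpa [hx, List.append_assoc, Int.add_comm] using this

theorem ordLoopB_merge (xs : List Int) : ∀ (pool p : List Int),
    ordLoopB (PySem.List.enumerate xs (p.length : Int)) (p ++ xs) pool = p ++ ordMerge2 xs pool := by
  induction xs with
  | nil => intro pool p; simp [PySem.List.enumerate_nil, ordLoopB, ordMerge2]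
  | cons x xs ih =>
    intro pool p
    rw [PySem.List.enumerate_cons]
    by_cases hx : x > 0
    · simp only [ordLoopB, if_pos hx, ordMerge2]
      set m := (PySem.List.min? pool (fun y => y)).getD 0 with hm
      have hset : (p ++ x :: xs).set ((p.length : Int)).toNat m = p ++ m :: xs := by
        simpa using set_len_append p xs x m
      rw [hset]
      have := ih ((PySem.List.remove? pool m).getD pool) (p ++ [m])
      simp only [List.length_append, List.length_cons, List.length_nil] at this
      simpa [List.append_assoc, Int.add_comm] using this
    · simp only [ordLoopB, if_neg hx, ordMerge2]
      have := ih pool (p ++ [x])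
      simp only [List.length_append, List.length_cons, List.length_nil] at this
      simpa [hx, List.append_assoc, Int.add_comm] using this

theorem selSort_perm_aux : ∀ (n : Nat) (p : List Int), p.length ≤ n → (selSort p).Perm p := by
  intro n
  induction n with
  | zero =>
    intro p hp
    have hp0 : p = [] := by cases p <;> simp_all
    subst hp0
    rw [selSort]
    split
    · exact List.Perm.nil
    · rename_i m h
      exact absurd (PySem.List.min?_mem h) (List.not_mem_nil)
  | succ n ih =>
    intro p hp
    rw [selSort]
    split
    · rename_i h
      simp [(PySem.List.min?_eq_none_iff p (fun y => y)).mp h]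
    · rename_i m h
      have hm : m ∈ p := PySem.List.min?_mem h
      have hpne : p ≠ [] := by intro hc; subst hc; simp at hm
      have hlen : (p.erase m).length ≤ n := by
        have h1 := List.length_erase_of_mem hm
        have h2 : p.length ≠ 0 := by simpa using hpne
        omega
      exact ((ih _ hlen).cons m).trans (List.perm_cons_erase hm).symm

theorem selSort_perm (p : List Int) : (selSort p).Perm p :=
  selSort_perm_aux p.length p (le_refl _)

theorem selSort_pairwise_aux : ∀ (n : Nat) (p : List Int), p.length ≤ n →
    (selSort p).Pairwise (· ≤ ·) := by
  intro n
  induction n with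
  | zero =>
    intro p hp
    have hp0 : p = [] := by cases p <;> simp_all
    subst hp0
    rw [selSort]
    exact List.Pairwise.nil
  | succ n ih =>
    intro p hp
    rw [selSort]
    split
    · exact List.Pairwise.nil
    · rename_i m h
      have hm : m ∈ p := PySem.List.min?_mem h
      have hpne : p ≠ [] := by intro hc; subst hc; simp at hm
      have hlen : (p.erase m).length ≤ n := by
        have h1 := List.length_erase_of_mem hm
        have h2 : p.length ≠ 0 := by simpa using hpne
        omega
      refine List.Pairwise.cons (fun y hy => ?_) (ih _ hlen)
      have hy' : y ∈ p.erase m := (selSort_perm (p.erase m)).mem_iff.mp hy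
      exact PySem.List.min?_isMin h y (List.mem_of_mem_erase hy')

theorem selSort_pairwise (p : List Int) : (selSort p).Pairwise (· ≤ ·) :=
  selSort_pairwise_aux p.length p (le_refl _)

theorem selSort_eq_sorted (p : List Int) :
    selSort p = PySem.List.sorted p (fun x => x) false :=
  (PySem.List.sorted_id_eq_of_perm_of_pairwise p (selSort p)
    (selSort_perm p) (selSort_pairwise p)).symm

theorem merge2_eq_merge (xs : List Int) : ∀ (pool : List Int),
    (xs.filter (fun k => k > 0)).length ≤ pool.length →
    ordMerge2 xs pool = ordMerge xs (selSort pool) := by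
  induction xs with
  | nil => intro pool _; rfl
  | cons x xs ih =>
    intro pool hlen
    by_cases hx : x > 0
    · have hne : pool ≠ [] := by
        intro h; subst h
        simp [hx] at hlen
      obtain ⟨m, hm⟩ : ∃ m, PySem.List.min? pool (fun y => y) = some m := by
        cases h : PySem.List.min? pool (fun y => y) with
        | none => exact absurd ((PySem.List.min?_eq_none_iff pool (fun y => y)).mp h) hne
        | some m => exact ⟨m, rfl⟩
      have hmem : m ∈ pool := PySem.List.min?_mem hm
      have hrem : PySem.List.remove? pool m = some (pool.erase m) :=
        PySem.List.remove?_eq_some_erase pool m hmem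
      have hsel : selSort pool = m :: selSort (pool.erase m) := by
        rw [selSort]; split <;> simp_all
      rw [hsel]
      simp only [ordMerge2, ordMerge, if_pos hx, hm, hrem, Option.getD_some]
      have hlen' : (xs.filter (fun k => k > 0)).length ≤ (pool.erase m).length := by
        have h1 := List.length_erase_of_mem hmem
        rw [List.filter_cons_of_pos (by simpa using hx), List.length_cons] at hlen
        have h2 : pool.length ≠ 0 := by
          intro hc; exact hne (List.length_eq_zero_iff.mp hc)
        omega
      exact congrArg (m :: ·) (ih (pool.erase m) hlen')
    · simp only [ordMerge2, ordMerge, if_neg hx]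
      refine congrArg (x :: ·) (ih pool ?_)
      simpa [hx] using hlen

-- ===== VERDICT (by name: the statement is the Claim_ definition above) =====
theorem orderna_positivos_spec : Claim_equal_orderna_positivos := by
  intro list _
  unfold Spec_orderna_positivos orderna_positivos orderna_positivos_alt
  by_cases h : list = []
  · subst h; rfl
  · simp only [h, ne_eq, not_false_iff, if_true]
    have hA := ordLoopA_merge list (PySem.List.sorted (list.filter (fun k => k > 0)) (fun x => x) false) []
    have hB := ordLoopB_merge list (list.filter (fun k => k > 0)) []
    simp only [List.length_nil, List.nil_append, Int.ofNat_zero] at hA hB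
    rw [hB, hA, merge2_eq_merge list _ (le_refl _), selSort_eq_sorted]
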